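-- pv_equiv track=rewrite | github.com/samuelmasuy/Concordia-Schedule-to-Gcal | app/eventParser.py | recurent_event_factor
-- ===== SOURCE A (Python) =====
-- def recurent_event_factor(seq):
--     """Allows to gather course together if they are the same type i.e.
--     lectures and tutorials."""
--     seen_type = {}
--     result = []
--     for item in seq:
--         marker = item[1]
--         if marker in seen_type:
--             to_add = item[0][0]
--             for course in result:
--                 if course[1] == marker:
--                     course[0][0] = ("%s,%s" % (course[0][0], to_add))
--             continue
--         seen_type[marker] = 1
--         result.append(item)
--     return result
-- ===== SOURCE B (Python) =====
-- def recurent_event_factor(seq):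
--     """Allows to gather course together if they are the same type i.e.
--     lectures and tutorials."""
--     groups = {}
--     for item in seq:
--         groups.setdefault(item[1], []).append(item)
--     result = []
--     for items in groups.values():
--         first = items[0]
--         if len(items) > 1:
--             name = first[0][0]
--             for it in items[1:]:
--                 name = "%s,%s" % (name, it[0][0])
--             first[0][0] = name
--         result.append(first)
--     return result
-- ===== Notes on version B (the rewrite author's own statement) =====
-- stated objective: alternative
-- what changed: B groups items by marker in one dict pass and then emits each group once (folding the group's names left with '%s,%s'), instead of A's rescanning of the whole result list on every repeated marker.
import Mathlib
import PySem

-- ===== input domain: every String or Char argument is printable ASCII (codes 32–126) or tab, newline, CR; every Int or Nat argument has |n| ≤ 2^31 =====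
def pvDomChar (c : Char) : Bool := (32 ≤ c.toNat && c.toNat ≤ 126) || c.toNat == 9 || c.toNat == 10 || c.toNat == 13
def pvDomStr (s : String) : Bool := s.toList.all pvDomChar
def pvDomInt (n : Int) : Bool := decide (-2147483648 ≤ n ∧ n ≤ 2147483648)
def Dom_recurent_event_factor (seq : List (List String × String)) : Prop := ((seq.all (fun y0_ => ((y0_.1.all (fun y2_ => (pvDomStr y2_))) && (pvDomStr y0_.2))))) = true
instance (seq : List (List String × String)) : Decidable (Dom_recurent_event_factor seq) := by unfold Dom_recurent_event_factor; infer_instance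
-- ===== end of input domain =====

-- B groups items by marker once and emits each group in one pass; return-value equivalence only
-- (both Pythons mutate the first occurrence's name list in place in the same way).

-- "%s,%s" % (a, b) for strings a b
def pyFmt (a b : String) : String := a ++ "," ++ b

-- ===== PORT A =====
def pvStepA (st : PySem.Dict String Int × List (List String × String))
    (item : List String × String) : PySem.Dict String Int × List (List String × String) :=
  let marker := item.2
  if st.1.contains marker then
    let to_add := item.1.headD ""   -- item[0][0]; Python raises on []: excluded by Pre_
    (st.1, st.2.map (fun course =>
      if course.2 = marker then
        (match course.1 with
         | [] => ([] : List String)       -- Python raises here: excluded by Pre_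
         | n :: t => pyFmt n to_add :: t, course.2)
      else course))
  else
    (st.1.insert marker 1, st.2 ++ [item])

def recurent_event_factor (seq : List (List String × String)) : List (List String × String) :=
  (seq.foldl pvStepA (PySem.Dict.empty, [])).2

-- ===== PORT B =====
-- first pass: groups.setdefault(item[1], []).append(item)
def pvGroups (seq : List (List String × String)) :
    PySem.Dict String (List (List String × String)) :=
  seq.foldl (fun d item => d.modify item.2 [] (· ++ [item])) PySem.Dict.empty

-- second pass over groups.values()
def recurent_event_factor_alt (seq : List (List String × String)) : List (List String × String) :=
  (pvGroups seq).values.foldl (fun result items =>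
    match items with
    | [] => result                        -- unreachable: group values are nonempty
    | first :: rest =>
      if rest = [] then result ++ [first]
      else
        let name := rest.foldl (fun n it => pyFmt n (it.1.headD "")) (first.1.headD "")
        result ++ [(name :: first.1.tail, first.2)]) []

-- ===== PRECONDITION & SPEC =====
-- Pre_ excludes exactly the inputs on which A raises IndexError: an item whose marker occurs
-- at least twice but whose name list is empty (A reads/writes item[0][0] for such items).
def Pre_recurent_event_factor (seq : List (List String × String)) : Prop :=
  ∀ p ∈ seq, 2 ≤ (seq.filter (fun q => q.2 == p.2)).length → p.1 ≠ []
instance (seq : List (List String × String)) : Decidable (Pre_recurent_event_factor seq) := by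
  unfold Pre_recurent_event_factor; infer_instance

def pvWitness_recurent_event_factor : (List (List String × String)) :=
  [(["Lec A"], "lecture"), (["Tut B"], "tutorial"), (["Lec C"], "lecture")]

def Spec_recurent_event_factor (seq : List (List String × String)) (out : List (List String × String)) : Prop := out = recurent_event_factor_alt seq
instance (seq : List (List String × String)) (out : List (List String × String)) : Decidable (Spec_recurent_event_factor seq out) := by unfold Spec_recurent_event_factor; infer_instance

-- ===== CLAIM (what is proved, stated in full; the proofs are below) =====
def Claim_equal_recurent_event_factor : Prop := ∀ (seq : List (List String × String)), Dom_recurent_event_factor seq → Pre_recurent_event_factor seq → Spec_recurent_event_factor seq (recurent_event_factor seq)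

-- ===== LEMMAS AND PROOFS =====

-- the group of marker m, in order of appearance
def pvGroup (seq : List (List String × String)) (m : String) : List (List String × String) :=
  seq.filter (fun it => it.2 == m)

-- the distinct markers in first-appearance order
def pvSpine (seq : List (List String × String)) : List String :=
  PySem.Set.ofList (seq.map (·.2))

-- what both programs emit for marker m
def pvEmitOne (seq : List (List String × String)) (m : String) : List String × String :=
  match pvGroup seq m with
  | [] => ([], m)
  | f :: rest =>
    if rest = [] then f
    else ((rest.foldl (fun n it => pyFmt n (it.1.headD "")) (f.1.headD "")) :: f.1.tail, f.2)

theorem pvGroups_getD (seq : List (List String × String)) (m : String)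
    (d : PySem.Dict String (List (List String × String))) :
    (seq.foldl (fun d item => d.modify item.2 [] (· ++ [item])) d).getD m [] =
      d.getD m [] ++ pvGroup seq m := by
  induction seq generalizing d with
  | nil => simp [pvGroup]
  | cons x xs ih =>
    simp only [List.foldl_cons, ih, pvGroup, List.filter_cons]
    rw [PySem.Dict.getD_modify]
    by_cases h : x.2 == m
    · simp [eq_of_beq h]
    · have : ¬ m = x.2 := fun e => by simp [e] at h
      simp [this, h]

theorem pvEmitOne_marker (seq : List (List String × String)) (m : String) :
    (pvEmitOne seq m).2 = m := by
  unfold pvEmitOne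
  cases hg : pvGroup seq m with
  | nil => rfl
  | cons f rest =>
    have hf : f ∈ pvGroup seq m := by simp [hg]
    have : f.2 = m := by
      have := (List.mem_filter.mp hf).2
      exact eq_of_beq this
    by_cases hr : rest = [] <;> simp [hr, this]

theorem pvEmitOne_append_ne (seq : List (List String × String)) (x : List String × String)
    (m : String) (h : ¬ x.2 = m) : pvEmitOne (seq ++ [x]) m = pvEmitOne seq m := by
  unfold pvEmitOne pvGroup
  rw [List.filter_append]
  simp [h]

theorem pvSpine_append (seq : List (List String × String)) (x : List String × String) :
    pvSpine (seq ++ [x]) =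
      if x.2 ∈ seq.map (·.2) then pvSpine seq else pvSpine seq ++ [x.2] := by
  unfold pvSpine
  rw [List.map_append, PySem.Set.ofList_append]
  simp only [List.map_cons, List.map_nil]
  rw [PySem.Set.update_cons, PySem.Set.update_nil]
  by_cases h : x.2 ∈ seq.map (·.2)
  · simp [PySem.Set.add, PySem.Set.mem_ofList, h]
  · simp [PySem.Set.add, PySem.Set.mem_ofList, h]

theorem mem_spine_iff (seq : List (List String × String)) (m : String) :
    m ∈ pvSpine seq ↔ m ∈ seq.map (·.2) := PySem.Set.mem_ofList _ _

-- ===== B-side characterisation =====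

theorem foldl_append_emit (g : List (List String × String) → List (List String × String))
    (l : List (List (List String × String))) (acc : List (List String × String)) :
    l.foldl (fun r v => r ++ g v) acc = acc ++ l.flatMap g := by
  induction l generalizing acc with
  | nil => simp
  | cons v vs ih => simp [ih]

theorem pvGroups_keys (seq : List (List String × String)) :
    (pvGroups seq).keys = pvSpine seq := by
  unfold pvGroups pvSpine
  rw [PySem.Dict.keys_foldl_modify_key]
  simp [PySem.Dict.keys_empty, PySem.Set.update_nil_left]

theorem pvGroups_nodup (seq : List (List String × String)) :
    (pvGroups seq).keys.Nodup := by
  unfold pvGroups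
  exact PySem.Dict.nodup_keys_foldl_modify_key _ _ _ _ _ PySem.Dict.nodup_keys_empty

theorem flatMap_singleton_eq_map {α β : Type} (l : List α) (g : α → List β) (f : α → β)
    (h : ∀ a ∈ l, g a = [f a]) : l.flatMap g = l.map f := by
  induction l with
  | nil => rfl
  | cons a as ih =>
    simp only [List.flatMap_cons, List.map_cons, h a (by simp), ih fun a ha => h a (by simp [ha])]
    rfl

theorem alt_char (seq : List (List String × String)) :
    recurent_event_factor_alt seq = (pvSpine seq).map (pvEmitOne seq) := by
  unfold recurent_event_factor_alt
  have hval : (pvGroups seq).values = (pvSpine seq).map (fun m => pvGroup seq m) := by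
    rw [PySem.Dict.values_eq_map_keys _ (pvGroups_nodup seq) [], pvGroups_keys]
    apply List.map_congr_left
    intro m _
    have := pvGroups_getD seq m PySem.Dict.empty
    simpa [pvGroups, PySem.Dict.getD_empty] using this
  -- rewrite the loop body as r ++ g items
  have hbody : ∀ (result : List (List String × String))
      (items : List (List String × String)),
      (match items with
        | [] => result
        | first :: rest =>
          if rest = [] then result ++ [first]
          else
            let name := rest.foldl (fun n it => pyFmt n (it.1.headD "")) (first.1.headD "")
            result ++ [(name :: first.1.tail, first.2)]) =
      result ++ (match items with
        | [] => []
        | first :: rest =>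
          if rest = [] then [first]
          else [((rest.foldl (fun n it => pyFmt n (it.1.headD "")) (first.1.headD "")) :: first.1.tail, first.2)]) := by
    intro result items
    cases items with
    | nil => simp
    | cons f rest => by_cases hr : rest = [] <;> simp [hr]
  calc (pvGroups seq).values.foldl (fun result items =>
          match items with
          | [] => result
          | first :: rest =>
            if rest = [] then result ++ [first]
            else
              let name := rest.foldl (fun n it => pyFmt n (it.1.headD "")) (first.1.headD "")
              result ++ [(name :: first.1.tail, first.2)]) []
      = (pvGroups seq).values.foldl (fun result items => result ++ (match items with
          | [] => []
          | first :: rest =>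
            if rest = [] then [first]
            else [((rest.foldl (fun n it => pyFmt n (it.1.headD "")) (first.1.headD "")) :: first.1.tail, first.2)])) [] := by
        congr 1
        funext r items
        exact hbody r items
    _ = (pvGroups seq).values.flatMap (fun items => (match items with
          | [] => []
          | first :: rest =>
            if rest = [] then [first]
            else [((rest.foldl (fun n it => pyFmt n (it.1.headD "")) (first.1.headD "")) :: first.1.tail, first.2)])) := by
        rw [foldl_append_emit]; simp
    _ = (pvSpine seq).map (pvEmitOne seq) := by
        rw [hval, List.flatMap_map]
        apply flatMap_singleton_eq_map
        intro m hm
        have hmem : m ∈ seq.map (·.2) := (mem_spine_iff seq m).mp hm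
        obtain ⟨it, hit, he⟩ := List.mem_map.mp hmem
        have hne : pvGroup seq m ≠ [] := by
          intro h0
          have : it ∈ pvGroup seq m := List.mem_filter.mpr ⟨hit, by simp [he]⟩
          simp [h0] at this
        cases hg : pvGroup seq m with
        | nil => exact absurd hg hne
        | cons f rest =>
          by_cases hr : rest = [] <;> simp [pvEmitOne, hg, hr]

-- ===== A-side characterisation =====

theorem pre_mono (seq : List (List String × String)) (x : List String × String)
    (h : Pre_recurent_event_factor (seq ++ [x])) : Pre_recurent_event_factor seq := by
  intro p hp hlen
  apply h p (by simp [hp])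
  rw [List.filter_append]
  calc (2:ℕ) ≤ (seq.filter (fun q => q.2 == p.2)).length := hlen
    _ ≤ _ := by simp

theorem pvGroup_nil_of_not_mem (xs : List (List String × String)) (m : String)
    (h : m ∉ xs.map (·.2)) : pvGroup xs m = [] := by
  rw [pvGroup, List.filter_eq_nil_iff]
  intro it hit hb
  exact h (List.mem_map.mpr ⟨it, hit, eq_of_beq hb⟩)

theorem pvGroup_mem_marker (xs : List (List String × String)) (m : String)
    (f : List String × String) (hf : f ∈ pvGroup xs m) : f.2 = m :=
  eq_of_beq (List.mem_filter.mp hf).2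

theorem pvGroup_append_self (xs : List (List String × String)) (x : List String × String) :
    pvGroup (xs ++ [x]) x.2 = pvGroup xs x.2 ++ [x] := by
  rw [pvGroup, List.filter_append, pvGroup]
  simp

theorem a_char (seq : List (List String × String))
    (hpre : Pre_recurent_event_factor seq) :
    (seq.foldl pvStepA (PySem.Dict.empty, [])).2 = (pvSpine seq).map (pvEmitOne seq) ∧
    ∀ m, (seq.foldl pvStepA (PySem.Dict.empty, [])).1.contains m = decide (m ∈ seq.map (·.2)) := by
  induction seq using List.reverseRecOn with
  | nil =>
    constructor
    · rfl
    · intro m; simp [PySem.Dict.contains_empty]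
  | append_singleton xs x ih =>
    obtain ⟨ihr, ihs⟩ := ih (pre_mono xs x hpre)
    rw [List.foldl_append, List.foldl_cons, List.foldl_nil]
    by_cases hmem : x.2 ∈ xs.map (·.2)
    · -- marker already seen: A updates the matching course in place
      have hc : (xs.foldl pvStepA (PySem.Dict.empty, [])).1.contains x.2 = true := by
        rw [ihs]; simp [hmem]
      constructor
      · show (if _ then _ else _ : PySem.Dict String Int × List (List String × String)).2 = _
        rw [if_pos hc]
        rw [pvSpine_append, if_pos hmem]
        show List.map _ (xs.foldl pvStepA (PySem.Dict.empty, [])).2 = _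
        rw [ihr, List.map_map]
        apply List.map_congr_left
        intro m hm
        show (if (pvEmitOne xs m).2 = x.2 then _ else _) = pvEmitOne (xs ++ [x]) m
        by_cases hmx : m = x.2
        · subst hmx
          -- the group of x.2 gains x at the end
          obtain ⟨it, hit, he⟩ := List.mem_map.mp hmem
          have hne : pvGroup xs x.2 ≠ [] := by
            intro h0
            have : it ∈ pvGroup xs x.2 := List.mem_filter.mpr ⟨hit, by simp [he]⟩
            simp [h0] at this
          obtain ⟨f, rest, hg⟩ : ∃ f rest, pvGroup xs x.2 = f :: rest := by
            cases h : pvGroup xs x.2 with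
            | nil => exact absurd h hne
            | cons a b => exact ⟨a, b, rfl⟩
          have hf2 : f.2 = x.2 := pvGroup_mem_marker xs x.2 f (by simp [hg])
          have hg' : pvGroup (xs ++ [x]) x.2 = f :: (rest ++ [x]) := by
            rw [pvGroup_append_self, hg]; rfl
          have hfin : f ∈ xs := (List.mem_filter.mp (by simp [hg] : f ∈ pvGroup xs x.2)).1
          have hf1 : f.1 ≠ [] := by
            apply hpre f (by simp [hfin])
            have : (xs ++ [x]).filter (fun q => q.2 == f.2) = pvGroup (xs ++ [x]) x.2 := by
              rw [pvGroup]; congr 1; funext q; rw [hf2]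
            rw [this, hg']
            simp
          obtain ⟨n, t, hft⟩ : ∃ n t, f.1 = n :: t := by
            cases h : f.1 with
            | nil => exact absurd h hf1
            | cons a b => exact ⟨a, b, rfl⟩
          by_cases hr : rest = []
          · subst hr
            rw [pvEmitOne, hg, pvEmitOne, hg']
            simp [hf2, hft, pyFmt]
          · rw [pvEmitOne, hg, pvEmitOne, hg']
            simp [hr, hf2, List.foldl_append]
        · rw [if_neg (by rw [pvEmitOne_marker]; exact hmx)]
          exact (pvEmitOne_append_ne xs x m (fun e => hmx (e.symm))).symm
      · intro m
        show (if _ then _ else _ : PySem.Dict String Int × List (List String × String)).1.contains m = _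
        rw [if_pos hc]
        show (xs.foldl pvStepA (PySem.Dict.empty, [])).1.contains m = _
        rw [ihs]
        by_cases hm : m = x.2
        · subst hm; simp [hmem]
        · simp [hm]
    · -- new marker: A appends the item
      have hc : (xs.foldl pvStepA (PySem.Dict.empty, [])).1.contains x.2 = false := by
        rw [ihs]; simp [hmem]
      constructor
      · show (if _ then _ else _ : PySem.Dict String Int × List (List String × String)).2 = _
        rw [if_neg (by rw [hc]; exact Bool.false_ne_true)]
        show (xs.foldl pvStepA (PySem.Dict.empty, [])).2 ++ [x] = _
        rw [ihr, pvSpine_append, if_neg hmem, List.map_append]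
        congr 1
        · apply List.map_congr_left
          intro m hm
          have hmm : m ∈ xs.map (·.2) := (mem_spine_iff xs m).mp hm
          exact (pvEmitOne_append_ne xs x m (fun e => hmem (e ▸ hmm))).symm
        · rw [List.map_cons, List.map_nil, pvEmitOne, pvGroup_append_self,
            pvGroup_nil_of_not_mem xs x.2 hmem]
          simp
      · intro m
        show (if _ then _ else _ : PySem.Dict String Int × List (List String × String)).1.contains m = _
        rw [if_neg (by rw [hc]; exact Bool.false_ne_true)]
        show ((xs.foldl pvStepA (PySem.Dict.empty, [])).1.insert x.2 1).contains m = _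
        rw [PySem.Dict.contains_insert, ihs]
        by_cases hm : m = x.2
        · subst hm
          simp [List.map_append]
        · rw [show (m == x.2) = false from beq_eq_false_iff_ne.mpr hm, Bool.false_or,
            List.map_append, decide_eq_decide]
          simp [hm]

-- ===== VERDICT (by name: the statement is the Claim_ definition above) =====
theorem recurent_event_factor_spec : Claim_equal_recurent_event_factor := by
  intro seq _ hpre
  unfold Spec_recurent_event_factor
  rw [recurent_event_factor, (a_char seq hpre).1, alt_char]
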